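-- pv_equiv track=rewrite | github.com/havamal-65/Cybersecurity-Projects | Geolocation Guesser from Images/services/vision_service.py | validate_street_name
-- ===== SOURCE A (Python) =====
-- def validate_street_name(street_name, confidence):
--     """
--     Basic validation for street names to flag potentially inaccurate readings
--     """
--     warnings = []
--
--     # Common OCR misreadings that should be flagged
--     suspicious_patterns = [
--         'weybren',  # Not a real street name pattern
--         'qqqq', 'wwww', 'eeee',  # Repetitive characters often indicate OCR errors
--         '|||', '...', '---',  # Special character patterns
--     ]
--
--     street_lower = street_name.lower()
--
--     # Check for suspicious patterns
--     for pattern in suspicious_patterns: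
--         if pattern in street_lower:
--             warnings.append(f"Suspicious pattern '{pattern}' detected - possible OCR error")
--
--     # Check for unusual character combinations
--     if len(street_name) > 3:
--         vowels = 'aeiou'
--         consonant_count = 0
--         for char in street_name.lower():
--             if char.isalpha() and char not in vowels:
--                 consonant_count += 1
--             else:
--                 consonant_count = 0
--             if consonant_count > 4:  # Too many consecutive consonants
--                 warnings.append("Unusual consonant pattern - verify spelling")
--                 break
--
--     # If low confidence and warnings, suggest manual verification
--     if confidence < 70 and warnings:
--         warnings.append("Low confidence reading with suspicious patterns - manual verification recommended")
--
--     return warnings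
-- ===== SOURCE B (Python) =====
-- def validate_street_name(street_name, confidence):
--     """
--     Basic validation for street names to flag potentially inaccurate readings
--     """
--     street_lower = street_name.lower()
--
--     warnings = [f"Suspicious pattern '{p}' detected - possible OCR error"
--                 for p in ('weybren', 'qqqq', 'wwww', 'eeee', '|||', '...', '---')
--                 if p in street_lower]
--
--     if len(street_name) > 3:
--         # Run-length encode the lowered name into maximal runs of
--         # (is-consonant?, run length), then look for a consonant run of >= 5.
--         runs = []
--         for ch in street_lower:
--             is_cons = ch.isalpha() and ch not in 'aeiou'
--             if runs and runs[-1][0] == is_cons: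
--                 runs[-1][1] += 1
--             else:
--                 runs.append([is_cons, 1])
--         if any(k and n >= 5 for k, n in runs):
--             warnings.append("Unusual consonant pattern - verify spelling")
--
--     if confidence < 70 and warnings:
--         warnings.append("Low confidence reading with suspicious patterns - manual verification recommended")
--
--     return warnings
-- ===== Notes on version B (the rewrite author's own statement) =====
-- stated objective: alternative
-- what changed: The pattern scan becomes a comprehension (filter+map) instead of an appending loop, and the consecutive-consonant detector is rewritten to run-length-encode the name into maximal (is-consonant, length) runs and test whether any consonant run reaches length 5, instead of A's incremental counter with reset and break.
import Mathlib
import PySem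

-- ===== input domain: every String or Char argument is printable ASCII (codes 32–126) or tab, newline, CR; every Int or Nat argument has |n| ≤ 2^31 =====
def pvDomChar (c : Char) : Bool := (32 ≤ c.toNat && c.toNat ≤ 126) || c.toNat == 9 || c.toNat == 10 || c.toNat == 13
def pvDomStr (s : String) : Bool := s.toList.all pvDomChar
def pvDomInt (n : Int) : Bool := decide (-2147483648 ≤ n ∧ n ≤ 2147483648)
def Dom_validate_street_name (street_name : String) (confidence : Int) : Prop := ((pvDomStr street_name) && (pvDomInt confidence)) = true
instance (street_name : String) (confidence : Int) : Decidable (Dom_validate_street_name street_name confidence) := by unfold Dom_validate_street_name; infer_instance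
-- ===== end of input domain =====

-- B replaces A's pattern-appending loop with a filter+map comprehension and A's incremental
-- reset-and-break consonant counter with run-length encoding of maximal consonant runs
-- (objective: alternative decomposition; return values proved identical; no speed claim).

-- shared literal data: the message strings and the per-character consonant test
def pvPatterns : List String := ["weybren", "qqqq", "wwww", "eeee", "|||", "...", "---"]
def pvPatMsg (p : String) : String := "Suspicious pattern '" ++ p ++ "' detected - possible OCR error"
def pvConsMsg : String := "Unusual consonant pattern - verify spelling"
def pvLowMsg : String := "Low confidence reading with suspicious patterns - manual verification recommended"
-- char.isalpha() and char not in 'aeiou'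
def pvIsCons (c : Char) : Bool := PySem.Chars.isalpha c && !(['a', 'e', 'i', 'o', 'u'].contains c)

-- ===== PORT A =====
-- A's consonant loop: counter incremented on consonants, reset otherwise, break once > 4
def pvLoopA : List Char → Nat → Bool
  | [], _ => false
  | c :: cs, k =>
      let k' := if pvIsCons c then k + 1 else 0
      if k' > 4 then true else pvLoopA cs k'

def validate_street_name (street_name : String) (confidence : Int) : List String :=
  let street_lower := PySem.Str.lower street_name
  let warnings :=
    pvPatterns.foldl
      (fun ws p => if PySem.Str.isIn p street_lower then ws ++ [pvPatMsg p] else ws) []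
  let warnings :=
    if PySem.Str.len street_name > 3 then
      if pvLoopA street_lower.toList 0 then warnings ++ [pvConsMsg] else warnings
    else warnings
  if confidence < 70 && !(warnings == []) then warnings ++ [pvLowMsg] else warnings

-- ===== PORT B =====
-- Source B's run builder: runs[-1] is the head of the accumulator (built reversed, reversed at the end)
def pvStepB (acc : List (Bool × Nat)) (ch : Char) : List (Bool × Nat) :=
  let is_cons := pvIsCons ch
  match acc with
  | (p, n) :: rest => if p == is_cons then (p, n + 1) :: rest else (is_cons, 1) :: (p, n) :: rest
  | [] => [(is_cons, 1)]

def validate_street_name_alt (street_name : String) (confidence : Int) : List String :=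
  let street_lower := PySem.Str.lower street_name
  let warnings := (pvPatterns.filter (fun p => PySem.Str.isIn p street_lower)).map pvPatMsg
  let warnings :=
    if PySem.Str.len street_name > 3 then
      let runs := (street_lower.toList.foldl pvStepB []).reverse
      if runs.any (fun r => r.1 && decide (r.2 ≥ 5)) then warnings ++ [pvConsMsg] else warnings
    else warnings
  if confidence < 70 && !(warnings == []) then warnings ++ [pvLowMsg] else warnings

-- ===== PRECONDITION & SPEC =====
def Spec_validate_street_name (street_name : String) (confidence : Int) (out : List String) : Prop := out = validate_street_name_alt street_name confidence
instance (street_name : String) (confidence : Int) (out : List String) : Decidable (Spec_validate_street_name street_name confidence out) := by unfold Spec_validate_street_name; infer_instance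

-- ===== CLAIM (what is proved, stated in full; the proofs are below) =====
def Claim_equal_validate_street_name : Prop := ∀ (street_name : String) (confidence : Int), Dom_validate_street_name street_name confidence → Spec_validate_street_name street_name confidence (validate_street_name street_name confidence)

-- ===== LEMMAS AND PROOFS =====

-- A's appending pattern loop is filter-then-map
theorem pv_pat_eq (ps : List String) (t : String) (ws : List String) :
    ps.foldl (fun ws p => if PySem.Str.isIn p t then ws ++ [pvPatMsg p] else ws) ws
      = ws ++ (ps.filter (fun p => PySem.Str.isIn p t)).map pvPatMsg := by
  induction ps generalizing ws with
  | nil => simp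
  | cons p ps ih =>
      rw [List.foldl_cons, List.filter_cons]
      by_cases h : PySem.Str.isIn p t = true
      · rw [if_pos h, if_pos h, ih, List.map_cons, List.append_assoc, List.singleton_append]
      · rw [if_neg h, if_neg h, ih]

-- current consonant-run length encoded by a nonempty run accumulator
def pvCur : List (Bool × Nat) → Nat
  | (true, n) :: _ => n
  | _ => 0

def pvRunHit (r : Bool × Nat) : Bool := r.1 && decide (r.2 ≥ 5)

-- the core invariant: folding B's run builder from a nonempty accumulator detects a long
-- consonant run iff A's counter loop (started at the current run length) fires, or one
-- of the already-accumulated runs is long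
theorem pv_main (cs : List Char) : ∀ (acc : List (Bool × Nat)), acc ≠ [] →
    ((cs.foldl pvStepB acc).any pvRunHit) = (pvLoopA cs (pvCur acc) || acc.any pvRunHit) := by
  induction cs with
  | nil =>
      intro acc hacc
      match acc with
      | (p, n) :: rest => cases p <;> simp [pvLoopA, pvRunHit]
  | cons c cs ih =>
      intro acc hacc
      match acc with
      | (p, n) :: rest =>
        have hstep : pvStepB ((p, n) :: rest) c =
            (if p == pvIsCons c then (p, n + 1) :: rest
             else (pvIsCons c, 1) :: (p, n) :: rest) := rfl
        rw [List.foldl_cons, hstep]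
        by_cases hk : pvIsCons c
        · cases p with
          | true =>
              -- consonant extends a consonant run
              rw [if_pos (by simp [hk])]
              rw [ih _ (by simp)]
              simp only [pvCur, pvLoopA, hk, if_pos, pvRunHit, List.any_cons]
              by_cases h5 : n + 1 > 4
              · have h5' : n + 1 ≥ 5 := h5
                simp [h5']
                exact Or.inl (Or.inl (by omega))
              · have : ¬ n ≥ 5 := by omega
                have : ¬ n + 1 ≥ 5 := by omega
                simp [*]
          | false =>
              -- consonant starts a new run after a non-consonant run
              rw [if_neg (by simp [hk])]
              rw [ih _ (by simp)]
              simp [pvCur, pvLoopA, hk, pvRunHit]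
        · cases p with
          | true =>
              -- non-consonant closes a consonant run
              rw [if_neg (by simp [hk])]
              rw [ih _ (by simp)]
              simp [pvCur, pvLoopA, hk, pvRunHit, Bool.or_comm, Bool.or_left_comm]
          | false =>
              -- non-consonant extends a non-consonant run
              rw [if_pos (by simp [hk])]
              rw [ih _ (by simp)]
              simp [pvCur, pvLoopA, hk, pvRunHit]

-- top-level: B's run check equals A's counter loop
theorem pv_flag_eq (l : List Char) :
    ((l.foldl pvStepB []).reverse.any (fun r => r.1 && decide (r.2 ≥ 5))) = pvLoopA l 0 := by
  have hfun : (fun r : Bool × Nat => r.1 && decide (r.2 ≥ 5)) = pvRunHit := rfl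
  rw [List.any_reverse, hfun]
  cases l with
  | nil => simp [pvLoopA]
  | cons c cs =>
      rw [List.foldl_cons]
      have hstep : pvStepB [] c = [(pvIsCons c, 1)] := rfl
      rw [hstep, pv_main cs _ (by simp)]
      by_cases hk : pvIsCons c <;>
        simp [pvLoopA, pvCur, pvRunHit, hk]

-- ===== VERDICT (by name: the statement is the Claim_ definition above) =====
theorem validate_street_name_spec : Claim_equal_validate_street_name := by
  intro street_name confidence _
  unfold Spec_validate_street_name validate_street_name validate_street_name_alt
  simp only [pv_pat_eq, ← pv_flag_eq, List.nil_append]
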